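-- pv_equiv track=rewrite | github.com/TheoBFAV/APP1 | client-fichier_final.py | retour
-- ===== SOURCE A (Python) =====
-- def retour(liste):
--
--     sequence=[]
--
--     retour=[]
--
--     for lettre in liste:
--
--         if lettre not in sequence:
--
--             sequence.append(lettre)
--
--             retour.append(lettre)
--
--         else:
--
--             i=sequence.index(lettre)
--
--             if i==len(sequence)-1:
--
--                 retour.append(sequence[0])
--                 sequence.append(sequence.pop(0))
--
--             else:
--
--                 retour.append(sequence[i+1])
--
--                 sequence.append(sequence.pop(i+1))
--
--     return retour
-- ===== SOURCE B (Python) =====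
-- def retour(liste):
--     # successor-map linked list: succ[x] = element after x in the sequence (None for the tail)
--     succ = {}
--     head = None
--     tail = None
--     out = []
--     for x in liste:
--         if x not in succ:
--             if tail is None:
--                 head = x
--             else:
--                 succ[tail] = x
--             succ[x] = None
--             tail = x
--             out.append(x)
--         else:
--             if x == tail:
--                 s = head
--                 if s != x:
--                     head = succ[s]
--                     succ[x] = s
--                     succ[s] = None
--                     tail = s
--             else:
--                 s = succ[x]
--                 if s != tail:
--                     succ[x] = succ[s]
--                     succ[tail] = s
--                     succ[s] = None
--                     tail = s
--             out.append(s)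
--     return out
-- ===== Notes on version B (the rewrite author's own statement) =====
-- stated objective: faster
-- what changed: Replaces A's list with its per-element linear scans (membership test, .index, pop(0)/pop(i+1)) by a successor-map linked list: a dict mapping each letter to the next one plus head/tail references, giving O(1) membership, successor lookup and move-to-tail per input element.
import Mathlib
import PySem

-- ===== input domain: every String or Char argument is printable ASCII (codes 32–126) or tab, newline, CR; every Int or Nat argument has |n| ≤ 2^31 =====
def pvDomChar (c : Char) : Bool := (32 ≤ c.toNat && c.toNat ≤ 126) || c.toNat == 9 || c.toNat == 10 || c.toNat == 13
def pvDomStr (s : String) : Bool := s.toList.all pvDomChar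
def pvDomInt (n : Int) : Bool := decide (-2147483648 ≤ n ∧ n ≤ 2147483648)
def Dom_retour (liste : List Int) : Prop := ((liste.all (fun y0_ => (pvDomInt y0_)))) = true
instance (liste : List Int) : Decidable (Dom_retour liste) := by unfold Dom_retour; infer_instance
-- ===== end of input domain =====

-- B replaces A's list scans (in / index / pop(0)) by a successor-map linked list (dict letter→next
-- plus head/tail): O(1) membership, successor lookup and move-to-tail per element.

-- ===== PORT A =====
-- one iteration of A's for-loop; state = (sequence, retour)
def retourStep (st : List Int × List Int) (lettre : Int) : List Int × List Int :=
  if lettre ∉ st.1 then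
    (st.1 ++ [lettre], st.2 ++ [lettre])
  else
    match PySem.List.index? st.1 lettre with
    | none => st  -- unreachable: lettre ∈ sequence
    | some i =>
      if (i : Int) = (st.1.length : Int) - 1 then
        match PySem.List.pyGet? st.1 0, PySem.List.pop? st.1 0 with
        | some v, some pr => (pr.2 ++ [pr.1], st.2 ++ [v])
        | _, _ => st  -- unreachable: sequence nonempty
      else
        match PySem.List.pyGet? st.1 ((i : Int) + 1), PySem.List.pop? st.1 ((i : Int) + 1) with
        | some v, some pr => (pr.2 ++ [pr.1], st.2 ++ [v])
        | _, _ => st  -- unreachable: i+1 in range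

def retour (liste : List Int) : List Int :=
  (liste.foldl retourStep ([], [])).2

-- ===== PORT B =====
-- one iteration of B's for-loop; state = (succ, head, tail, out)
def retourAltStep (st : PySem.Dict Int (Option Int) × Option Int × Option Int × List Int)
    (x : Int) : PySem.Dict Int (Option Int) × Option Int × Option Int × List Int :=
  let (succ, head, tail, out) := st
  if succ.contains x = false then
    match tail with
    | none => (succ.insert x none, some x, some x, out ++ [x])
    | some t => ((succ.insert t (some x)).insert x none, head, some x, out ++ [x])
  else
    if some x = tail then
      match head with
      | none => st  -- unreachable: dict nonempty has a head
      | some s =>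
        if s ≠ x then
          match succ.get? s with
          | none => st  -- unreachable: head is a key
          | some hs => ((succ.insert x (some s)).insert s none, hs, some s, out ++ [s])
        else (succ, head, tail, out ++ [s])
    else
      match succ.get? x with
      | none => st  -- unreachable: x is a key
      | some sOpt =>
        if sOpt ≠ tail then
          match sOpt with
          | none => st  -- unreachable in Python too (would be a KeyError): only the tail maps to None
          | some s =>
            match succ.get? s, tail with
            | some ss, some t =>
              (((succ.insert x ss).insert t (some s)).insert s none, head, some s, out ++ [s])
            | _, _ => st  -- unreachable: s is a key and the dict is nonempty
        else
          match sOpt with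
          | none => st  -- unreachable: tail = none means the dict is empty
          | some s => (succ, head, tail, out ++ [s])

def retour_alt (liste : List Int) : List Int :=
  (liste.foldl retourAltStep (PySem.Dict.empty, none, none, [])).2.2.2

-- ===== PRECONDITION & SPEC =====
def Spec_retour (liste : List Int) (out : List Int) : Prop := out = retour_alt liste
instance (liste : List Int) (out : List Int) : Decidable (Spec_retour liste out) := by unfold Spec_retour; infer_instance

-- ===== CLAIM (what is proved, stated in full; the proofs are below) =====
def Claim_equal_retour : Prop := ∀ (liste : List Int), Dom_retour liste → Spec_retour liste (retour liste)

-- ===== LEMMAS AND PROOFS =====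

-- Chain d l t: walking d's successor pointers along l, each element points to the next, the last to t.

def pvChain (d : PySem.Dict Int (Option Int)) : List Int → Option Int → Prop
  | [], _ => True
  | a :: r, t => d.get? a = some ((r.head?.map some).getD t) ∧ pvChain d r t

lemma pvChain_congr {d d' : PySem.Dict Int (Option Int)} {l : List Int} {t : Option Int}
    (hc : pvChain d l t) (h : ∀ a ∈ l, d'.get? a = d.get? a) : pvChain d' l t := by
  induction l with
  | nil => trivial
  | cons a r ih =>
    exact ⟨(h a (by simp)).trans hc.1, ih hc.2 (fun b hb => h b (by simp [hb]))⟩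

lemma pvChain_append {d : PySem.Dict Int (Option Int)} {l₁ l₂ : List Int} {t : Option Int} :
    pvChain d (l₁ ++ l₂) t ↔ pvChain d l₁ ((l₂.head?.map some).getD t) ∧ pvChain d l₂ t := by
  induction l₁ with
  | nil => simp [pvChain]
  | cons a r ih =>
    simp only [List.cons_append, pvChain, ih, List.head?_append]
    cases r <;> simp <;> tauto

lemma pvChain_retarget {d d' : PySem.Dict Int (Option Int)} {l : List Int} {t t' : Option Int}
    (hc : pvChain d l t)
    (hmid : ∀ a ∈ l.dropLast, d'.get? a = d.get? a)
    (hlast : ∀ h : l ≠ [], d'.get? (l.getLast h) = some t') : pvChain d' l t' := by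
  induction l with
  | nil => trivial
  | cons a r ih =>
    cases r with
    | nil => exact ⟨by simpa using hlast (by simp), trivial⟩
    | cons b r' =>
      refine ⟨?_, ih hc.2 (fun y hy => hmid y (by simp [List.dropLast] at hy ⊢; tauto)) ?_⟩
      · have := hmid a (by simp [List.dropLast])
        rw [this, hc.1]; simp
      · intro _
        have := hlast (by simp)
        simpa [List.getLast] using this

lemma pvNodup_dropLast_ne_getLast {l : List Int} (hnd : l.Nodup) (hne : l ≠ [])
    {a : Int} (ha : a ∈ l.dropLast) : a ≠ l.getLast hne := by
  intro h
  have := List.dropLast_concat_getLast hne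
  rw [← this] at hnd
  simp [List.nodup_append] at hnd
  exact hnd.2 a ha h

lemma pvEraseIdx_append (l l2 : List Int) (k : Nat) :
    (l ++ l2).eraseIdx (l.length + k) = l ++ l2.eraseIdx k := by
  induction l with
  | nil => simp
  | cons a l ih => simp [Nat.succ_add, ih]


-- the invariant tying B's state to A's sequence
def pvRep (seq : List Int) (d : PySem.Dict Int (Option Int)) (hd tl : Option Int) : Prop :=
  seq.Nodup ∧ hd = seq.head? ∧ tl = seq.getLast? ∧ pvChain d seq none ∧
    ∀ y : Int, y ∉ seq → d.get? y = none

lemma pvStep (seq : List Int) (d : PySem.Dict Int (Option Int)) (hd tl : Option Int) (x : Int)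
    (h : pvRep seq d hd tl) (r1 r2 : List Int) :
    ∃ seq' d' hd' tl' e,
      retourStep (seq, r1) x = (seq', r1 ++ [e]) ∧
      retourAltStep (d, hd, tl, r2) x = (d', hd', tl', r2 ++ [e]) ∧
      pvRep seq' d' hd' tl' := by
  obtain ⟨hnd, hhd, htl, hch, hdom⟩ := h
  by_cases hx : x ∈ seq
  · -- x already present: emit its cyclic successor and move it to the end
    have hsome : (PySem.List.index? seq x).isSome := (PySem.List.index?_isSome_iff seq x).mpr hx
    obtain ⟨i, hidx⟩ := Option.isSome_iff_exists.mp hsome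
    obtain ⟨pre, suf, hseq, hlen, hxpre⟩ := (PySem.List.index?_eq_some_iff seq x i).mp hidx
    subst hseq
    subst hlen
    have hndp := hnd
    simp only [List.nodup_append, List.nodup_cons] at hndp
    have hchsplit := pvChain_append.mp hch
    have hchpre : pvChain d pre (some x) := by simpa using hchsplit.1
    have hchx : pvChain d (x :: suf) none := hchsplit.2
    have hcx : d.contains x = true := by
      rw [PySem.Dict.contains_eq_isSome_get?, hchx.1]; rfl
    cases suf with
    | nil =>
      have htlx : tl = some x := by simpa using htl
      cases pre with
      | nil =>
        have hA : retourStep (([] : List Int) ++ [x], r1) x = ([x], r1 ++ [x]) := by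
          simp [retourStep, PySem.List.pop?_zero_cons]
        have hhdx : hd = some x := by simpa using hhd
        refine ⟨[x], d, hd, tl, x, hA, ?_, ?_⟩
        · simp [retourAltStep, hcx, htlx, hhdx]
        · exact ⟨by simp, by simpa using hhd, by simpa using htl, by simpa using hch,
            fun y hy => hdom y (by simpa using hy)⟩
      | cons p ps =>
        -- wrap-around: emit the head p and rotate it to the end
        have hpx : p ≠ x := fun hh => hxpre (by simp [hh])
        have hxp : x ≠ p := fun hh => hpx hh.symm
        have hmm : ¬ (x ∉ (p :: ps) ++ [x]) := by simp
        have hcond : (((p :: ps).length : Nat) : Int) = (((p :: ps) ++ [x]).length : Int) - 1 := by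
          simp only [List.length_cons, List.length_append, List.length_nil]
          push_cast; ring
        have hA : retourStep ((p :: ps) ++ [x], r1) x = ((ps ++ [x]) ++ [p], r1 ++ [p]) := by
          unfold retourStep
          rw [if_neg hmm]
          simp only [hidx]
          rw [if_pos hcond]
          simp [PySem.List.pyGet?_zero_cons, PySem.List.pop?_zero_cons]
        obtain ⟨q, l3, hql⟩ : ∃ q l3, ps ++ [x] = q :: l3 := by
          cases hq : ps ++ [x] with
          | nil => simp at hq
          | cons a b => exact ⟨a, b, rfl⟩
        have hhdp : hd = some p := by simpa using hhd
        have hgp : d.get? p = some (some q) := by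
          have h1 := hch.1
          rw [show ps.append [x] = q :: l3 from hql] at h1
          simpa using h1
        have hB : retourAltStep (d, hd, tl, r2) x =
            ((d.insert x (some p)).insert p none, some q, some p, r2 ++ [p]) := by
          simp [retourAltStep, hcx, htlx, hhdp, hpx, hgp]
        refine ⟨(ps ++ [x]) ++ [p], (d.insert x (some p)).insert p none, some q, some p, p,
          hA, hB, ?_, ?_, ?_, ?_, ?_⟩
        · exact ((List.perm_append_singleton p (ps ++ [x])).nodup_iff).mpr (by simpa using hnd)
        · rw [List.head?_append, hql]; simp
        · simp
        · refine pvChain_append.mpr ⟨?_, by simp [pvChain, PySem.Dict.get?_insert_self]⟩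
          have hchtail : pvChain d (ps ++ [x]) none := hch.2
          refine pvChain_retarget hchtail (fun a ha => ?_) (fun h' => ?_)
          · rw [List.dropLast_concat] at ha
            have hax : a ≠ x := fun hh => hxpre (List.mem_cons_of_mem p (hh ▸ ha))
            have hap : a ≠ p := by
              have hpn : p ∉ ps ++ [x] := by
                have h2 := hnd
                simp only [List.cons_append, List.nodup_cons] at h2
                exact h2.1
              exact fun hh => hpn (List.mem_append_left [x] (hh ▸ ha))
            simp [PySem.Dict.get?_insert, hax, hap]
          · have e : (ps ++ [x]).getLast h' = x := List.getLast_concat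
            rw [e]
            simp [PySem.Dict.get?_insert, hxp]
        · intro y hy
          have hyx : y ≠ x := by simp at hy; tauto
          have hyp : y ≠ p := by simp at hy; tauto
          have hyseq : y ∉ (p :: ps) ++ [x] := by simp at hy ⊢; tauto
          simp [PySem.Dict.get?_insert, hyx, hyp, hdom y hyseq]
    | cons s₀ suf₂ =>
      -- middle: emit the successor s₀ of x and move it to the end
      have hgx : d.get? x = some (some s₀) := by simpa using hchx.1
      have hxs : (x :: s₀ :: suf₂).Nodup := List.Nodup.of_append_right hnd
      have hxnotin : x ∉ s₀ :: suf₂ := (List.nodup_cons.mp hxs).1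
      have hs₀nd : (s₀ :: suf₂).Nodup := (List.nodup_cons.mp hxs).2
      have hmm : ¬ (x ∉ pre ++ x :: s₀ :: suf₂) := by simp
      have hcondn : ¬ ((pre.length : Int) = ((pre ++ x :: s₀ :: suf₂).length : Int) - 1) := by
        simp only [List.length_append, List.length_cons]
        push_cast; omega
      have hcast : ((pre.length : Int) + 1) = (((pre.length + 1 : Nat)) : Int) := by push_cast; ring
      have hge : (pre ++ x :: s₀ :: suf₂)[pre.length + 1]? = some s₀ := by
        rw [List.getElem?_append_right (by omega)]
        simp
      have hg : PySem.List.pyGet? (pre ++ x :: s₀ :: suf₂) ((pre.length : Int) + 1) = some s₀ := by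
        rw [hcast, PySem.List.pyGet?_natCast, hge]
      have hlt : pre.length + 1 < (pre ++ x :: s₀ :: suf₂).length := by simp
      have hgetelem : (pre ++ x :: s₀ :: suf₂)[pre.length + 1]'hlt = s₀ := by
        have := hge
        rwa [List.getElem?_eq_getElem hlt, Option.some_inj] at this
      have herase : (pre ++ x :: s₀ :: suf₂).eraseIdx (pre.length + 1) = pre ++ x :: suf₂ := by
        rw [pvEraseIdx_append pre (x :: s₀ :: suf₂) 1]
        rfl
      have hp : PySem.List.pop? (pre ++ x :: s₀ :: suf₂) ((pre.length : Int) + 1) =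
          some (s₀, pre ++ x :: suf₂) := by
        rw [hcast, PySem.List.pop?_natCast _ _ hlt, hgetelem, herase]
      have hA : retourStep (pre ++ x :: s₀ :: suf₂, r1) x =
          ((pre ++ x :: suf₂) ++ [s₀], r1 ++ [s₀]) := by
        unfold retourStep
        rw [if_neg hmm]
        simp only [hidx]
        rw [if_neg hcondn]
        simp only [hg, hp]
      cases suf₂ with
      | nil =>
        have htl2 : tl = some s₀ := by rw [htl]; simp
        have hxs0 : x ≠ s₀ := by simp at hxnotin; tauto
        have hB : retourAltStep (d, hd, tl, r2) x = (d, hd, tl, r2 ++ [s₀]) := by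
          simp [retourAltStep, hcx, htl2, hxs0, hgx]
        refine ⟨(pre ++ x :: []) ++ [s₀], d, hd, tl, s₀, hA, hB, ?_⟩
        have heq : (pre ++ x :: []) ++ [s₀] = pre ++ x :: s₀ :: [] := by simp
        rw [heq]
        exact ⟨hnd, hhd, htl, hch, hdom⟩
      | cons q suf₃ =>
        obtain ⟨tlv, htlv0⟩ : ∃ v, (q :: suf₃).getLast? = some v :=
          ⟨_, List.getLast?_eq_some_getLast (List.cons_ne_nil q suf₃)⟩
        have htlvmem : tlv ∈ q :: suf₃ := List.mem_of_getLast? htlv0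
        have hgl : ∀ h' : q :: suf₃ ≠ [], (q :: suf₃).getLast h' = tlv := by
          intro h'
          have h5 := List.getLast?_eq_some_getLast (l := q :: suf₃) h'
          rw [htlv0] at h5
          exact (Option.some_inj.mp h5).symm
        have htlv : tl = some tlv := by
          rw [htl, List.getLast?_append, ← htlv0]
          simp [htlv0]
        have hs0tl : s₀ ≠ tlv := fun hh => (List.nodup_cons.mp hs₀nd).1 (hh ▸ htlvmem)
        have hxs0 : x ≠ s₀ := fun hh => hxnotin (hh ▸ List.mem_cons_self)
        have hxtlv : x ≠ tlv := fun hh => hxnotin (hh ▸ List.mem_cons_of_mem s₀ htlvmem)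
        have hgs₀ : d.get? s₀ = some (some q) := by simpa using hchx.2.1
        have hB : retourAltStep (d, hd, tl, r2) x =
            (((d.insert x (some q)).insert tlv (some s₀)).insert s₀ none, hd, some s₀,
              r2 ++ [s₀]) := by
          simp [retourAltStep, hcx, htlv, hxtlv, hgx, hs0tl, hgs₀]
        have hperm : List.Perm ((pre ++ x :: q :: suf₃) ++ [s₀]) (pre ++ x :: s₀ :: q :: suf₃) := by
          refine (List.perm_append_singleton s₀ _).trans ?_
          have h1 := (List.perm_middle (a := s₀) (l₁ := pre ++ [x]) (l₂ := q :: suf₃)).symm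
          simpa using h1
        have hdisj : ∀ a ∈ pre, a ≠ x ∧ a ≠ s₀ ∧ a ≠ tlv := by
          intro a ha
          have hd2 := hndp.2.2 a ha
          exact ⟨hd2 x (by simp), hd2 s₀ (by simp),
            hd2 tlv (by simp [htlvmem])⟩
        refine ⟨(pre ++ x :: q :: suf₃) ++ [s₀],
          ((d.insert x (some q)).insert tlv (some s₀)).insert s₀ none, hd, some s₀, s₀,
          hA, hB, ?_, ?_, ?_, ?_, ?_⟩
        · exact (hperm.nodup_iff).mpr hnd
        · rw [hhd]; cases pre <;> simp
        · rw [show pre ++ x :: q :: suf₃ ++ [s₀] = (pre ++ x :: q :: suf₃) ++ [s₀] by simp,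
            List.getLast?_concat]
        · refine pvChain_append.mpr ⟨?_, by simp [pvChain, PySem.Dict.get?_insert_self]⟩
          show pvChain _ (pre ++ x :: q :: suf₃) (some s₀)
          refine pvChain_append.mpr ⟨?_, ?_⟩
          · show pvChain _ pre (some x)
            refine pvChain_congr hchpre (fun a ha => ?_)
            obtain ⟨h1, h2, h3⟩ := hdisj a ha
            simp [PySem.Dict.get?_insert, h1, h2, h3]
          · refine ⟨?_, ?_⟩
            · simp [PySem.Dict.get?_insert, hxs0, hxtlv]
            · have hchq : pvChain d (q :: suf₃) none := hchx.2.2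
              refine pvChain_retarget hchq (fun a ha => ?_) (fun h' => ?_)
              · have has : a ≠ s₀ := fun hh =>
                  (List.nodup_cons.mp hs₀nd).1 (hh ▸ List.mem_of_mem_dropLast ha)
                have hax : a ≠ x := fun hh =>
                  hxnotin (hh ▸ List.mem_cons_of_mem s₀ (List.mem_of_mem_dropLast ha))
                have hat : a ≠ tlv := by
                  have h6 := pvNodup_dropLast_ne_getLast (List.nodup_cons.mp hs₀nd).2
                    (List.cons_ne_nil q suf₃) ha
                  rwa [hgl (List.cons_ne_nil q suf₃)] at h6
                simp [PySem.Dict.get?_insert, has, hax, hat]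
              · rw [hgl h']
                simp [PySem.Dict.get?_insert, Ne.symm hs0tl]
        · intro y hy
          have hymem : y ∉ pre ++ x :: s₀ :: q :: suf₃ := fun hc => hy (hperm.mem_iff.mpr hc)
          have hyx : y ≠ x := fun hh => hymem (hh ▸ hx)
          have hys : y ≠ s₀ := fun hh =>
            hymem (hh ▸ (by simp : s₀ ∈ pre ++ x :: s₀ :: q :: suf₃))
          have hyt : y ≠ tlv := fun hh => hymem (hh ▸ (by
            simp only [List.mem_append, List.mem_cons]
            simp at htlvmem
            tauto : tlv ∈ pre ++ x :: s₀ :: q :: suf₃))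
          simp [PySem.Dict.get?_insert, hyx, hys, hyt, hdom y hymem]
  · -- x is new: both sides append it at the end
    have hA : retourStep (seq, r1) x = (seq ++ [x], r1 ++ [x]) := by
      simp [retourStep, hx]
    have hcx : d.contains x = false := by
      rw [PySem.Dict.contains_eq_isSome_get?, hdom x hx]; rfl
    by_cases hnil : seq = []
    · subst hnil
      have htl' : tl = none := by simpa using htl
      refine ⟨[x], d.insert x none, some x, some x, x, hA, ?_, ?_⟩
      · simp [retourAltStep, hcx, htl']
      · refine ⟨by simp, by simp, by simp, ?_, ?_⟩
        · exact ⟨by simp [PySem.Dict.get?_insert_self], trivial⟩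
        · intro y hy
          have hy' : y ≠ x := by simpa using hy
          simp [PySem.Dict.get?_insert, hy', hdom y (by simp)]
    · have htl' : tl = some (seq.getLast hnil) := by
        rw [htl, List.getLast?_eq_some_getLast hnil]
      have hgx : seq.getLast hnil ≠ x := fun hh => hx (hh ▸ List.getLast_mem hnil)
      refine ⟨seq ++ [x], (d.insert (seq.getLast hnil) (some x)).insert x none, hd, some x, x,
        hA, ?_, ?_, ?_, ?_, ?_, ?_⟩
      · simp [retourAltStep, hcx, htl']
      · simp only [List.nodup_append, List.nodup_cons]
        exact ⟨hnd, by simp, fun a ha => by simp; exact fun hh => hx (hh ▸ ha)⟩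
      · rw [hhd, List.head?_append, Option.or_of_isSome (by simpa [List.isSome_head?] using hnil)]
      · simp
      · refine pvChain_append.mpr ⟨?_, by simp [pvChain, PySem.Dict.get?_insert_self]⟩
        refine pvChain_retarget hch (fun a ha => ?_) (fun h' => ?_)
        · have hax : a ≠ x := fun hh => hx (hh ▸ List.mem_of_mem_dropLast ha)
          have hal : a ≠ seq.getLast hnil := pvNodup_dropLast_ne_getLast hnd hnil ha
          simp [PySem.Dict.get?_insert, hax, hal]
        · have e : seq.getLast h' = seq.getLast hnil := rfl
          rw [e]
          simp [PySem.Dict.get?_insert, hgx]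
      · intro y hy
        have hy1 : y ≠ x := by simp at hy; tauto
        have hy2 : y ∉ seq := by simp at hy; tauto
        have hy3 : y ≠ seq.getLast hnil := fun hh => hy2 (hh ▸ List.getLast_mem hnil)
        simp [PySem.Dict.get?_insert, hy1, hy3, hdom y hy2]

lemma pvFold (l : List Int) : ∀ (seq : List Int) (d : PySem.Dict Int (Option Int))
    (hd tl : Option Int) (r : List Int), pvRep seq d hd tl →
    (l.foldl retourStep (seq, r)).2 = (l.foldl retourAltStep (d, hd, tl, r)).2.2.2 := by
  induction l with
  | nil => intro seq d hd tl r _; rfl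
  | cons x l ih =>
    intro seq d hd tl r hrep
    obtain ⟨seq', d', hd', tl', e, hA, hB, hrep'⟩ := pvStep seq d hd tl x hrep r r
    simp only [List.foldl_cons, hA, hB]
    exact ih seq' d' hd' tl' (r ++ [e]) hrep'

-- ===== VERDICT (by name: the statement is the Claim_ definition above) =====
theorem retour_spec : Claim_equal_retour := by
  intro liste _
  unfold Spec_retour retour retour_alt
  exact pvFold liste [] PySem.Dict.empty none none []
    ⟨List.nodup_nil, rfl, rfl, trivial, fun y _ => by simp [PySem.Dict.get?_empty]⟩
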